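-- pv_equiv track=rewrite | github.com/stefan11a/SoftUniExercises | 2_Py_Fundamental/8_Text_Processing/winning_ticket.py | check_ticket
-- ===== SOURCE A (Python) =====
-- def check_ticket(ticket):
--     if len(ticket) != 20:
--         return 'invalid ticket'
--     winning_symbols = ['@', '#', '$', '^']
--     left_part = ticket[:10]
--     right_part = ticket[10:]
--
--     for match_symbol in winning_symbols:
--         for uninterrupted_match_length in range(10, 5, -1):
--             winning_repetition = match_symbol * uninterrupted_match_length
--             if winning_repetition in left_part and winning_repetition in right_part:
--                 if uninterrupted_match_length == 10:
--                     return f'ticket "{ticket}" - {uninterrupted_match_length}{match_symbol} Jackpot!'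
--                 return f'ticket "{ticket}" - {uninterrupted_match_length}{match_symbol}'
--     return f'ticket "{ticket}" - no match'
-- ===== SOURCE B (Python) =====
-- def check_ticket(ticket):
--     if len(ticket) != 20:
--         return 'invalid ticket'
--
--     def longest_run(part, sym):
--         best = cur = 0
--         for ch in part:
--             cur = cur + 1 if ch == sym else 0
--             if cur > best:
--                 best = cur
--         return best
--
--     left_part = ticket[:10]
--     right_part = ticket[10:]
--     for sym in '@#$^':
--         n = min(longest_run(left_part, sym), longest_run(right_part, sym))
--         if n >= 6:
--             suffix = ' Jackpot!' if n == 10 else ''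
--             return f'ticket "{ticket}" - {n}{sym}{suffix}'
--     return f'ticket "{ticket}" - no match'
-- ===== Notes on version B (the rewrite author's own statement) =====
-- stated objective: alternative
-- what changed: Instead of testing membership of sym*L substrings for L=10..6 in each half, B computes the longest consecutive run of each symbol in each half with one linear scan and returns min(left_run, right_run) when it is >= 6.
import Mathlib
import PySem

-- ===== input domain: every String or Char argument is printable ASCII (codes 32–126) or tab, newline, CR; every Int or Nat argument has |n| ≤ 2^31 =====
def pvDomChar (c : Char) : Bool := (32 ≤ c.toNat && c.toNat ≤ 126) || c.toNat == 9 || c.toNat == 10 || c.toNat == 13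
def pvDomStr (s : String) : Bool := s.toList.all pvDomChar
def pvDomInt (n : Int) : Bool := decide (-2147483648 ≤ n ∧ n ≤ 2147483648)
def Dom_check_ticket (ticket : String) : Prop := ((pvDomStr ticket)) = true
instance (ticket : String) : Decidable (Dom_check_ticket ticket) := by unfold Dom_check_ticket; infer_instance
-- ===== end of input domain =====

-- B replaces A's repeated substring-membership probes (sym*L in half, L = 10..6) by one
-- linear longest-run scan per half per symbol, returning min(left_run, right_run) when ≥ 6
-- (alternative decomposition; same observable behaviour).

-- ===== PORT A =====
-- f-strings are ported as concatenation of their character pieces (exact for these literals);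
-- Python's substring test `sub in s` is PySem.Chars.isIn, `sym * L` is PySem.List.pyRepeat.

def ckHdr (t : List Char) : List Char := "ticket \"".toList ++ t ++ "\" - ".toList

def ckInner (t left right : List Char) (sym : Char) : List Int → Option (List Char)
  | [] => none
  | L :: rest =>
    let rep := PySem.List.pyRepeat [sym] L
    if PySem.Chars.isIn rep left && PySem.Chars.isIn rep right then
      if L = 10 then
        some (ckHdr t ++ PySem.Int.toChars L ++ [sym] ++ " Jackpot!".toList)
      else
        some (ckHdr t ++ PySem.Int.toChars L ++ [sym])
    else ckInner t left right sym rest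

def ckOuter (t left right : List Char) : List Char → Option (List Char)
  | [] => none
  | sym :: syms =>
    match ckInner t left right sym (PySem.List.pyRange 10 5 (-1)) with
    | some r => some r
    | none => ckOuter t left right syms

def check_ticket (ticket : String) : String :=
  if PySem.Str.len ticket ≠ 20 then "invalid ticket"
  else
    let t := ticket.toList
    let left := PySem.List.slice t none (some 10)
    let right := PySem.List.slice t (some 10) none
    match ckOuter t left right ['@', '#', '$', '^'] with
    | some r => String.ofList r
    | none => String.ofList ("ticket \"".toList ++ t ++ "\" - no match".toList)

-- ===== PORT B =====
-- longest_run: one fold keeping (best, cur), exactly Source B's loop.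
def ckRun (sym : Char) (part : List Char) : Int :=
  (part.foldl
    (fun (p : Int × Int) ch =>
      let cur := if ch = sym then p.2 + 1 else 0
      ((if cur > p.1 then cur else p.1), cur))
    (0, 0)).1

def ckAltLoop (t left right : List Char) : List Char → List Char
  | [] => "ticket \"".toList ++ t ++ "\" - no match".toList
  | sym :: syms =>
    let n := min (ckRun sym left) (ckRun sym right)
    if n ≥ 6 then
      let suffix := if n = 10 then " Jackpot!".toList else []
      "ticket \"".toList ++ t ++ "\" - ".toList ++ PySem.Int.toChars n ++ [sym] ++ suffix
    else ckAltLoop t left right syms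

def check_ticket_alt (ticket : String) : String :=
  if PySem.Str.len ticket ≠ 20 then "invalid ticket"
  else
    let t := ticket.toList
    String.ofList
      (ckAltLoop t (PySem.List.slice t none (some 10)) (PySem.List.slice t (some 10) none)
        ['@', '#', '$', '^'])

-- ===== PRECONDITION & SPEC =====
def Spec_check_ticket (ticket : String) (out : String) : Prop := out = check_ticket_alt ticket
instance (ticket : String) (out : String) : Decidable (Spec_check_ticket ticket out) := by unfold Spec_check_ticket; infer_instance

-- ===== CLAIM (what is proved, stated in full; the proofs are below) =====
def Claim_equal_check_ticket : Prop := ∀ (ticket : String), Dom_check_ticket ticket → Spec_check_ticket ticket (check_ticket ticket)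

-- ===== LEMMAS AND PROOFS =====

-- length of the longest run of c at the head of xs
def ckLead (c : Char) : List Char → Nat
  | [] => 0
  | x :: xs => if x = c then ckLead c xs + 1 else 0

-- length of the longest run of c anywhere in xs (max over suffixes of their lead)
def ckBest (c : Char) : List Char → Nat
  | [] => 0
  | x :: xs => max (ckLead c (x :: xs)) (ckBest c xs)

theorem ckLead_le_ckBest (c : Char) (xs : List Char) : ckLead c xs ≤ ckBest c xs := by
  cases xs with
  | nil => simp [ckLead, ckBest]
  | cons x xs => simp [ckBest]

theorem ckLead_le_length (c : Char) : ∀ xs : List Char, ckLead c xs ≤ xs.length := by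
  intro xs
  induction xs with
  | nil => simp [ckLead]
  | cons x xs ih => simp only [ckLead, List.length_cons]; split <;> omega

theorem ckBest_le_length (c : Char) : ∀ xs : List Char, ckBest c xs ≤ xs.length := by
  intro xs
  induction xs with
  | nil => simp [ckBest]
  | cons x xs ih =>
    have h := ckLead_le_length c (x :: xs)
    simp only [ckBest, List.length_cons] at *
    rw [Nat.max_def]
    split_ifs <;> omega

theorem replicate_prefix_iff (c : Char) : ∀ (xs : List Char) (L : Nat),
    List.replicate L c <+: xs ↔ L ≤ ckLead c xs := by
  intro xs
  induction xs with
  | nil =>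
    intro L
    simp only [List.prefix_nil, List.replicate_eq_nil_iff, ckLead]
    omega
  | cons x xs ih =>
    intro L
    cases L with
    | zero => simp
    | succ L =>
      rw [List.replicate_succ, List.cons_prefix_cons]
      by_cases hx : x = c
      · subst hx
        simp only [ckLead, eq_self_iff_true, if_true, true_and, ih]
        omega
      · simp only [ckLead, if_neg hx]
        constructor
        · rintro ⟨h, -⟩; exact absurd h.symm hx
        · omega

theorem replicate_infix_iff (c : Char) : ∀ (xs : List Char) (L : Nat),
    List.replicate L c <:+: xs ↔ L ≤ ckBest c xs := by
  intro xs
  induction xs with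
  | nil =>
    intro L
    simp only [List.infix_nil, List.replicate_eq_nil_iff, ckBest]
    omega
  | cons x xs ih =>
    intro L
    rw [List.infix_cons_iff, replicate_prefix_iff, ih]
    simp only [ckBest]
    rw [Nat.max_def]
    split_ifs <;> omega

theorem ckLead_replicate_append (c : Char) (ys : List Char) :
    ∀ k : Nat, ckLead c (List.replicate k c ++ ys) = k + ckLead c ys := by
  intro k
  induction k with
  | zero => simp
  | succ k ih =>
    rw [List.replicate_succ, List.cons_append]
    simp only [ckLead, eq_self_iff_true, if_true, ih]
    omega

theorem ckBest_replicate_append (c : Char) (ys : List Char) :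
    ∀ k : Nat, ckBest c (List.replicate k c ++ ys) = max (k + ckLead c ys) (ckBest c ys) := by
  intro k
  induction k with
  | zero =>
    have h := ckLead_le_ckBest c ys
    simp only [List.replicate_zero, List.nil_append, Nat.zero_add]
    rw [Nat.max_def]
    split_ifs <;> omega
  | succ k ih =>
    rw [List.replicate_succ, List.cons_append]
    simp only [ckBest, ckLead_replicate_append, ckLead, eq_self_iff_true, if_true, ih]
    rw [Nat.max_def, Nat.max_def, Nat.max_def]
    split_ifs <;> omega

theorem replicate_append_cons (c : Char) (k : Nat) (xs : List Char) :
    List.replicate k c ++ c :: xs = List.replicate (k + 1) c ++ xs := by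
  rw [List.replicate_succ']
  simp

-- Source B's fold computes the longest run (generalized invariant over the state (best, cur))
theorem ckRun_foldl (c : Char) : ∀ (xs : List Char) (b k : Nat), k ≤ b →
    (xs.foldl
      (fun (p : Int × Int) ch =>
        let cur := if ch = c then p.2 + 1 else 0
        ((if cur > p.1 then cur else p.1), cur))
      ((b : Int), (k : Int))).1
    = ((max b (ckBest c (List.replicate k c ++ xs)) : Nat) : Int) := by
  intro xs
  induction xs with
  | nil =>
    intro b k hkb
    have h2 : ckLead c (List.replicate k c) = k := by
      have := ckLead_replicate_append c [] k
      simpa using this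
    have h3 : ckBest c (List.replicate k c) ≤ k := by
      have := ckBest_le_length c (List.replicate k c)
      simpa using this
    have h4 := ckLead_le_ckBest c (List.replicate k c)
    simp only [List.foldl_nil, List.append_nil]
    congr 1
    omega
  | cons x xs ih =>
    intro b k hkb
    rw [List.foldl_cons]
    by_cases hx : x = c
    · have hstep :
        (let cur := if x = c then ((b : Int), (k : Int)).2 + 1 else 0
         ((if cur > ((b : Int), (k : Int)).1 then cur else ((b : Int), (k : Int)).1), cur))
        = (((max b (k + 1) : Nat) : Int), ((k + 1 : Nat) : Int)) := by
        refine Prod.ext ?_ ?_ <;> simp only [hx, eq_self_iff_true, if_true] <;> push_cast <;>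
          (try split_ifs) <;> try omega
      rw [hstep, ih (max b (k + 1)) (k + 1) (by omega)]
      have hge : k + 1 ≤ ckBest c (List.replicate (k + 1) c ++ xs) := by
        rw [ckBest_replicate_append]
        have := Nat.le_max_left (k + 1 + ckLead c xs) (ckBest c xs)
        omega
      rw [hx, replicate_append_cons]
      congr 1
      omega
    · have hstep :
        (let cur := if x = c then ((b : Int), (k : Int)).2 + 1 else 0
         ((if cur > ((b : Int), (k : Int)).1 then cur else ((b : Int), (k : Int)).1), cur))
        = (((b : Nat) : Int), ((0 : Nat) : Int)) := by
        refine Prod.ext ?_ ?_ <;> simp only [if_neg hx] <;> push_cast <;>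
          (try split_ifs) <;> try omega
      rw [hstep, ih b 0 (by omega)]
      have h1 : ckBest c (List.replicate k c ++ x :: xs) = max k (ckBest c xs) := by
        rw [ckBest_replicate_append]
        simp only [ckLead, if_neg hx, ckBest, Nat.add_zero]
        rw [Nat.max_def, Nat.max_def]
        split_ifs <;> omega
      rw [h1]
      simp only [List.replicate_zero, List.nil_append]
      have hmax := Nat.le_max_left k (ckBest c xs)
      rw [Nat.max_def, Nat.max_def, Nat.max_def]
      split_ifs <;> omega

theorem ckRun_eq_ckBest (c : Char) (xs : List Char) : ckRun c xs = ((ckBest c xs : Nat) : Int) := by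
  have h := ckRun_foldl c xs 0 0 (by omega)
  simpa [ckRun] using h

-- A's membership condition, rephrased through the minimum of the two longest runs
theorem cond_eq (sym : Char) (left right : List Char) (L : Int) :
    (PySem.Chars.isIn (PySem.List.pyRepeat [sym] L) left &&
     PySem.Chars.isIn (PySem.List.pyRepeat [sym] L) right)
    = decide (L.toNat ≤ min (ckBest sym left) (ckBest sym right)) := by
  rw [PySem.List.pyRepeat_singleton, Bool.eq_iff_iff]
  simp only [Bool.and_eq_true, PySem.Chars.isIn_iff_infix, replicate_infix_iff,
    decide_eq_true_eq, le_min_iff]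

theorem pyRange_ten : PySem.List.pyRange 10 5 (-1) = [10, 9, 8, 7, 6] := by decide

-- the inner loop over L = 10..6 returns exactly B's formatted answer when min run ≥ 6
theorem ckInner_eq (t left right : List Char) (sym : Char)
    (hl : ckBest sym left ≤ 10) (hr : ckBest sym right ≤ 10) :
    ckInner t left right sym (PySem.List.pyRange 10 5 (-1))
    = (if 6 ≤ min (ckBest sym left) (ckBest sym right) then
        some (ckHdr t ++ PySem.Int.toChars ((min (ckBest sym left) (ckBest sym right) : Nat) : Int)
          ++ [sym] ++ (if min (ckBest sym left) (ckBest sym right) = 10 then " Jackpot!".toList else []))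
       else none) := by
  set m := min (ckBest sym left) (ckBest sym right) with hm
  have hm10 : m ≤ 10 := le_trans (Nat.min_le_left _ _) hl
  rw [pyRange_ten]
  simp only [ckInner, cond_eq, ← hm, show ((10:Int).toNat = 10) from rfl,
    show ((9:Int).toNat = 9) from rfl, show ((8:Int).toNat = 8) from rfl,
    show ((7:Int).toNat = 7) from rfl, show ((6:Int).toNat = 6) from rfl,
    decide_eq_true_eq, reduceIte]
  split_ifs <;> try rfl
  all_goals try omega
  all_goals
    first
    | (rw [show m = 10 from by omega]; norm_num)
    | (rw [show m = 9 from by omega]; norm_num)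
    | (rw [show m = 8 from by omega]; norm_num)
    | (rw [show m = 7 from by omega]; norm_num)
    | (rw [show m = 6 from by omega]; norm_num)

theorem ckLoop_eq (t left right : List Char)
    (hl : left.length ≤ 10) (hr : right.length ≤ 10) :
    ∀ syms : List Char,
    (match ckOuter t left right syms with
     | some r => r
     | none => "ticket \"".toList ++ t ++ "\" - no match".toList)
    = ckAltLoop t left right syms := by
  intro syms
  induction syms with
  | nil => simp [ckOuter, ckAltLoop]
  | cons sym syms ih =>
    have hBl : ckBest sym left ≤ 10 := le_trans (ckBest_le_length sym left) hl
    have hBr : ckBest sym right ≤ 10 := le_trans (ckBest_le_length sym right) hr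
    set m := min (ckBest sym left) (ckBest sym right) with hm
    have hn : min (ckRun sym left) (ckRun sym right) = ((m : Nat) : Int) := by
      rw [ckRun_eq_ckBest, ckRun_eq_ckBest, hm]
      push_cast
      rfl
    simp only [ckOuter, ckAltLoop, ckInner_eq t left right sym hBl hBr, hn, ← hm]
    by_cases h6 : 6 ≤ m
    · have h6' : ((m : Int) ≥ 6) := by exact_mod_cast h6
      rw [if_pos h6, if_pos h6']
      by_cases h10 : m = 10
      · have h10' : ((m : Int) = 10) := by exact_mod_cast h10
        rw [if_pos h10, if_pos h10']
        simp [ckHdr]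
      · have h10' : ¬ ((m : Int) = 10) := fun h => h10 (by exact_mod_cast h)
        rw [if_neg h10, if_neg h10']
        simp [ckHdr]
    · have h6' : ¬ ((m : Int) ≥ 6) := fun h => h6 (by exact_mod_cast h)
      rw [if_neg h6, if_neg h6']
      exact ih

-- ===== VERDICT (by name: the statement is the Claim_ definition above) =====
theorem check_ticket_spec : Claim_equal_check_ticket := by
  intro ticket _
  unfold Spec_check_ticket check_ticket check_ticket_alt
  by_cases hlen : PySem.Str.len ticket ≠ 20
  · rw [if_pos hlen, if_pos hlen]
  · rw [if_neg hlen, if_neg hlen]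
    have hleft : PySem.List.slice ticket.toList none (some 10) = ticket.toList.take 10 := by
      rw [PySem.List.slice_to ticket.toList (show (0:Int) ≤ 10 by norm_num),
        show ((10:Int).toNat = 10) from rfl]
    have hright : PySem.List.slice ticket.toList (some 10) none = ticket.toList.drop 10 := by
      rw [PySem.List.slice_from ticket.toList (show (0:Int) ≤ 10 by norm_num),
        show ((10:Int).toNat = 10) from rfl]
    have hlen20 : ticket.toList.length = 20 := by
      have := PySem.Str.len_eq ticket
      omega
    have hl : (PySem.List.slice ticket.toList none (some 10)).length ≤ 10 := by
      rw [hleft]; simp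
    have hr : (PySem.List.slice ticket.toList (some 10) none).length ≤ 10 := by
      rw [hright]; simp [hlen20]
    have h := ckLoop_eq ticket.toList
      (PySem.List.slice ticket.toList none (some 10))
      (PySem.List.slice ticket.toList (some 10) none) hl hr ['@', '#', '$', '^']
    simp only []
    rw [← h]
    cases ckOuter ticket.toList
        (PySem.List.slice ticket.toList none (some 10))
        (PySem.List.slice ticket.toList (some 10) none) ['@', '#', '$', '^'] with
    | none => rfl
    | some r => rfl
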